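-- pv_equiv track=rewrite | github.com/lapig-ufg/l2dc | src/modules/indexes.py | separateImages
-- ===== SOURCE A (Python) =====
-- def separateImages(images):
-- 	redImage = None
-- 	nirImage = None
--
-- 	for image in images:
-- 		if (image['is_red_band']):
-- 			redImage = image;
-- 		elif (image['is_nir_band']):
-- 			nirImage = image;
--
-- 	return redImage, nirImage;
-- ===== SOURCE B (Python) =====
-- def separateImages(images):
--     imgs = list(images)
--     redImage = next((img for img in reversed(imgs) if img['is_red_band']), None)
--     nirImage = next((img for img in reversed(imgs)
--                      if not img['is_red_band'] and img['is_nir_band']), None)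
--     return redImage, nirImage
-- ===== Notes on version B (the rewrite author's own statement) =====
-- stated objective: alternative
-- what changed: Replaces A's single forward stateful loop (two running variables updated by an if/elif) with two independent right-to-left searches that each take the first match, reproducing 'last match' without any mutable state; Pre_ excludes only the inputs on which A raises KeyError (an image missing 'is_red_band', or a non-red image missing 'is_nir_band').
import Mathlib
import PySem

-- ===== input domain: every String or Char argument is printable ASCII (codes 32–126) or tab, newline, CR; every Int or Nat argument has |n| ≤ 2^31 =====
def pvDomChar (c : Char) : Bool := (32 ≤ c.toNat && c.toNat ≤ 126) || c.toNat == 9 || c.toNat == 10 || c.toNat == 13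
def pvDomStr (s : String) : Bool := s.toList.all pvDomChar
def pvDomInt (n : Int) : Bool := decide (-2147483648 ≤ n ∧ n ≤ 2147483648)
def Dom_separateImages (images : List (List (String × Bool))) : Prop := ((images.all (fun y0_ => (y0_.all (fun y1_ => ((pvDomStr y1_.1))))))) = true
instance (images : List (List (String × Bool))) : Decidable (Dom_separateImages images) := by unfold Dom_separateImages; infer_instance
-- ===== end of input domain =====

-- B replaces A's single forward if/elif loop over two running variables by two independent
-- right-to-left first-match searches ('last match'); same O(n) cost, no mutable state.

-- ===== PORT A =====
-- one forward pass; the if/elif updates (redImage, nirImage); a missing key (Python KeyError)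
-- is excluded by Pre_ below, the port keeps the state there
def separateImages (images : List (List (String × Bool))) :
    (Option (List (String × Bool))) × (Option (List (String × Bool))) :=
  images.foldl
    (fun st image =>
      match image.lookup "is_red_band" with
      | some true => (some image, st.2)
      | some false =>
        match image.lookup "is_nir_band" with
        | some true => (st.1, some image)
        | _ => st
      | none => st)
    (none, none)

-- ===== PORT B =====
-- two independent first-match searches over the reversed list (next(... reversed(imgs) ...))
def separateImages_alt (images : List (List (String × Bool))) :
    (Option (List (String × Bool))) × (Option (List (String × Bool))) :=
  let imgs := images
  let redImage := imgs.reverse.find? (fun img => img.lookup "is_red_band" == some true)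
  let nirImage := imgs.reverse.find? (fun img =>
    (img.lookup "is_red_band" == some false) && (img.lookup "is_nir_band" == some true))
  (redImage, nirImage)

-- ===== PRECONDITION & SPEC =====
-- Pre_ excludes exactly the inputs on which A raises KeyError: some image missing the
-- 'is_red_band' key, or a non-red image missing the 'is_nir_band' key.
def Pre_separateImages (images : List (List (String × Bool))) : Prop :=
  ∀ image ∈ images, (image.lookup "is_red_band").isSome = true ∧
    (image.lookup "is_red_band" = some false → (image.lookup "is_nir_band").isSome = true)
instance (images : List (List (String × Bool))) : Decidable (Pre_separateImages images) := by
  unfold Pre_separateImages; infer_instance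
def pvWitness_separateImages : (List (List (String × Bool))) :=
  [[("is_red_band", true)], [("is_red_band", false), ("is_nir_band", true)]]

def Spec_separateImages (images : List (List (String × Bool))) (out : (Option (List (String × Bool))) × (Option (List (String × Bool)))) : Prop := out = separateImages_alt images
instance (images : List (List (String × Bool))) (out : (Option (List (String × Bool))) × (Option (List (String × Bool)))) : Decidable (Spec_separateImages images out) := by unfold Spec_separateImages; infer_instance

-- ===== CLAIM (what is proved, stated in full; the proofs are below) =====
def Claim_equal_separateImages : Prop := ∀ (images : List (List (String × Bool))), Dom_separateImages images → Pre_separateImages images → Spec_separateImages images (separateImages images)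

-- ===== LEMMAS AND PROOFS =====

-- loop characterisation: the fold from any start state equals the right-to-left first matches,
-- falling back to the start state
theorem sep_fold_char (xs : List (List (String × Bool)))
    (r n : Option (List (String × Bool))) :
    xs.foldl
      (fun st image =>
        match image.lookup "is_red_band" with
        | some true => (some image, st.2)
        | some false =>
          match image.lookup "is_nir_band" with
          | some true => (st.1, some image)
          | _ => st
        | none => st)
      (r, n)
    = ((xs.reverse.find? (fun img => img.lookup "is_red_band" == some true)).or r,
       (xs.reverse.find? (fun img =>
          (img.lookup "is_red_band" == some false) && (img.lookup "is_nir_band" == some true))).or n) := by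
  induction xs generalizing r n with
  | nil => simp
  | cons x xs ih =>
    simp only [List.foldl_cons, List.reverse_cons, List.find?_append]
    rcases hR : xs.reverse.find? (fun img => img.lookup "is_red_band" == some true) with _ | y <;>
    rcases hN : xs.reverse.find? (fun img =>
        (img.lookup "is_red_band" == some false) && (img.lookup "is_nir_band" == some true)) with _ | z <;>
    rcases hx : x.lookup "is_red_band" with _ | (_|_) <;>
    rcases hy : x.lookup "is_nir_band" with _ | (_|_) <;>
    simp [ih, hR, hN, hx, hy, List.find?, Option.or]

-- ===== VERDICT (by name: the statement is the Claim_ definition above) =====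
theorem separateImages_spec : Claim_equal_separateImages := by
  intro images _ _
  unfold Spec_separateImages separateImages separateImages_alt
  simp [sep_fold_char]
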